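-- pv_equiv track=rewrite | github.com/masonacevedo/leetcode_problems_new | 93_Restore_IP_Addresses.py | enumeratePossibilities
-- ===== SOURCE A (Python) =====
-- def enumeratePossibilities(s):
--
--     n = len(s)
--     possibleStrings = []
--     for i in range(1, n):
--         for j in range(i+1, n):
--             for k in range(j+1, n):
--                 newString = s[0:i] + "." + s[i:j] + "." + s[j:k] + "." + s[k:]
--                 possibleStrings.append(newString)
--
--     return possibleStrings
-- ===== SOURCE B (Python) =====
-- def enumeratePossibilities(s):
--     n = len(s)
--
--     def helper(start, parts):
--         if parts == 1:
--             return [s[start:]] if start < n else []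
--         out = []
--         for end in range(start + 1, n):
--             piece = s[start:end]
--             for rest in helper(end, parts - 1):
--                 out.append(piece + "." + rest)
--         return out
--
--     return helper(0, 4)
-- ===== Notes on version B (the rewrite author's own statement) =====
-- stated objective: alternative
-- what changed: Replaces A's three fixed nested index loops by a recursive backtracking helper over (start, partsLeft) that builds each address prefix-first, emitting the same strings in the same order.
import Mathlib
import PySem

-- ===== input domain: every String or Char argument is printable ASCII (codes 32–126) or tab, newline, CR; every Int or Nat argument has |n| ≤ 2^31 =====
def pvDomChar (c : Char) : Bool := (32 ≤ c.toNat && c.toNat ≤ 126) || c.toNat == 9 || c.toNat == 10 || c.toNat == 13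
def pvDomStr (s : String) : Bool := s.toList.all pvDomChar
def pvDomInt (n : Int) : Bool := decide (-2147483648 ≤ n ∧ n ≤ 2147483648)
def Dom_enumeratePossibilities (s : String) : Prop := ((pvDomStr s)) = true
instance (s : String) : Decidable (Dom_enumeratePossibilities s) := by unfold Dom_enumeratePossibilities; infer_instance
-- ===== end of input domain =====

-- B replaces A's three fixed nested index loops by a recursive backtracking helper over
-- (start, partsLeft); same outputs in the same order (alternative decomposition, no speed claim).

-- ===== PORT A =====
-- Transliteration of A's triple nested loop; Python strings are handled on the
-- List Char side (PySem.List.slice = Python slicing), String.ofList rebuilds each value.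
def enumeratePossibilities (s : String) : List String :=
  let cs := s.toList
  let n : Int := cs.length
  (PySem.List.pyRange 1 n 1).foldl (fun acc i =>
    (PySem.List.pyRange (i+1) n 1).foldl (fun acc2 j =>
      (PySem.List.pyRange (j+1) n 1).foldl (fun acc3 k =>
        acc3 ++ [String.ofList (PySem.List.slice cs (some 0) (some i) ++ ['.'] ++
                 PySem.List.slice cs (some i) (some j) ++ ['.'] ++
                 PySem.List.slice cs (some j) (some k) ++ ['.'] ++
                 PySem.List.slice cs (some k) none)]) acc2) acc) []

-- ===== PORT B =====
-- B's recursive helper(start, parts): strings built as List Char, finalized by String.ofList.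
def pvHelperB (cs : List Char) (n : Int) : Nat → Int → List (List Char)
  | 0, _ => []
  | 1, start => if start < n then [PySem.List.slice cs (some start) none] else []
  | (p+2), start =>
    (PySem.List.pyRange (start+1) n 1).foldl (fun acc e =>
      acc ++ (pvHelperB cs n (p+1) e).map
        (fun rest => PySem.List.slice cs (some start) (some e) ++ '.' :: rest)) []

def enumeratePossibilities_alt (s : String) : List String :=
  (pvHelperB s.toList (s.toList.length : Int) 4 0).map String.ofList

-- ===== PRECONDITION & SPEC =====
def Spec_enumeratePossibilities (s : String) (out : List String) : Prop := out = enumeratePossibilities_alt s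
instance (s : String) (out : List String) : Decidable (Spec_enumeratePossibilities s out) := by unfold Spec_enumeratePossibilities; infer_instance

-- ===== CLAIM (what is proved, stated in full; the proofs are below) =====
def Claim_equal_enumeratePossibilities : Prop := ∀ (s : String), Dom_enumeratePossibilities s → Spec_enumeratePossibilities s (enumeratePossibilities s)

-- ===== LEMMAS AND PROOFS =====


lemma pvHelperB_step (cs : List Char) (n : Int) (p : Nat) (start : Int) :
    pvHelperB cs n (p+2) start =
      (PySem.List.pyRange (start+1) n 1).flatMap
        (fun e => (pvHelperB cs n (p+1) e).map
          (fun rest => PySem.List.slice cs (some start) (some e) ++ '.' :: rest)) := by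
  show (PySem.List.pyRange (start+1) n 1).foldl _ [] = _
  rw [PySem.List.foldl_append_eq_flatMap]
  simp

-- ===== VERDICT (by name: the statement is the Claim_ definition above) =====
theorem enumeratePossibilities_spec : Claim_equal_enumeratePossibilities := by
  intro s _
  unfold Spec_enumeratePossibilities enumeratePossibilities enumeratePossibilities_alt
  simp only []
  set cs := s.toList with hcs
  set n : Int := (cs.length : Int) with hn
  -- A side: the three nested append-folds become nested flatMap/map
  simp only [PySem.List.foldl_append_singleton_eq_map, PySem.List.foldl_append_eq_flatMap,
    List.nil_append]
  -- B side: unfold the helper level by level (parts = 4, 3, 2, 1)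
  have h4 := pvHelperB_step cs n 2 0
  rw [show (2:Nat)+2 = 4 from rfl] at h4
  rw [h4, List.map_flatMap]
  apply List.flatMap_congr
  intro i hi
  rw [pvHelperB_step, List.map_flatMap, List.map_flatMap]
  apply List.flatMap_congr
  intro j hj
  rw [pvHelperB_step, List.map_flatMap, List.map_flatMap, List.map_flatMap]
  have : ∀ k ∈ PySem.List.pyRange (j+1) n 1, pvHelperB cs n 1 k = [PySem.List.slice cs (some k) none] := by
    intro k hk
    have := (PySem.List.mem_pyRange_one.mp hk).2
    simp [pvHelperB, this]
  rw [List.flatMap_congr (fun k hk => by rw [this k hk])]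
  simp only [List.map_cons, List.map_nil]
  rw [← List.map_eq_flatMap]
  simp [List.append_assoc]
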